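-- pv_equiv track=rewrite | github.com/szabo-roland/AoC2020 | 10/10.py | count_valid_subsequences
-- ===== SOURCE A (Python) =====
-- from functools import reduce
-- from itertools import combinations
--
-- def diff_reducer(acc, num):
--     acc['diffs'].append(num - acc['last'])
--     acc['last'] = num
--     return acc
--
-- def get_diffs(data):
--     return reduce(diff_reducer, data[1:], {'diffs': [], 'last': data[0]})['diffs']
--
-- def is_valid(data):
--     return all([d <= 3 for d in get_diffs(data)])
--
-- def get_all_middle_combinations(middle):
--     result = []
--     for i in range(len(middle) + 1):
--         result.extend([list(m) for m in combinations(middle, i)])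
--
--     return result
--
-- def count_valid_subsequences(data):
--     if len(data) < 3:
--         return 1
--
--     first = data[0]
--     last = data[-1]
--     middles = get_all_middle_combinations(data[1:-1])
--     valids = 0
--     for middle in middles:
--         if is_valid([first] + middle + [last]):
--             valids += 1
--
--     return valids
-- ===== SOURCE B (Python) =====
-- def count_valid_subsequences(data):
--     if len(data) < 3:
--         return 1
--     n = len(data)
--     f = [0] * n
--     f[n - 1] = 1
--     for i in range(n - 2, -1, -1):
--         f[i] = sum(f[j] for j in range(i + 1, n) if data[j] - data[i] <= 3)
--     return f[0]
-- ===== Notes on version B (the rewrite author's own statement) =====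
-- stated objective: faster
-- what changed: A enumerates all 2^(n-2) subsets of the middle elements and validates each chain; B computes the same count with a backward dynamic program where each position's count is the sum of the counts of later positions within difference 3, the last position counting 1, and the first position's count is returned.
import Mathlib
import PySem

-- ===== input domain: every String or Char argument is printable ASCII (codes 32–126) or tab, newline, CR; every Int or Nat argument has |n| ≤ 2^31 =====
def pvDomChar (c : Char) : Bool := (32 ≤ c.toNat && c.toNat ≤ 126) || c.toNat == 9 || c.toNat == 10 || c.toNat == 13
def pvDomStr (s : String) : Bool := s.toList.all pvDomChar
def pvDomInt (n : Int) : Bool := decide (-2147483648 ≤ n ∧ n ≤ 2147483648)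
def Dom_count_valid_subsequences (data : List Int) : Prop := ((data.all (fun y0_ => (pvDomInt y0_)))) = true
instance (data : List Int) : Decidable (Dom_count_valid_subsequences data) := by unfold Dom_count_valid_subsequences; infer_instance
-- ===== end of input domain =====

-- B replaces A's enumeration of all 2^(n-2) middle subsets with a backward DP counting
-- valid chains from each position to the last element (objective: faster).

-- ===== PORT A =====
def pvDiffReducer (acc : List Int × Int) (num : Int) : List Int × Int :=
  (acc.1 ++ [num - acc.2], num)

-- data[0]: A only ever calls get_diffs on a nonempty list, where pyGetD is exact
def pvGetDiffs (data : List Int) : List Int :=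
  ((data.drop 1).foldl pvDiffReducer ([], PySem.List.pyGetD data 0 0)).1

def pvIsValid (data : List Int) : Bool :=
  (pvGetDiffs data).all (fun d => decide (d ≤ 3))

-- itertools.combinations(l, k): k-element subsequences in lexicographic index order
def pvCombos : List Int → Nat → List (List Int)
  | _, 0 => [[]]
  | [], _ + 1 => []
  | x :: xs, k + 1 => (pvCombos xs k).map (fun m => x :: m) ++ pvCombos xs (k + 1)

def pvGetAllMiddleCombinations (middle : List Int) : List (List Int) :=
  (List.range (middle.length + 1)).foldl (fun acc i => acc ++ pvCombos middle i) []

def count_valid_subsequences (data : List Int) : Int :=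
  if data.length < 3 then 1
  else
    let first := PySem.List.pyGetD data 0 0      -- data[0]; in range since length ≥ 3
    let last := PySem.List.pyGetD data (-1) 0    -- data[-1]; in range
    let middles := pvGetAllMiddleCombinations (PySem.List.slice data (some 1) (some (-1)))
    middles.foldl
      (fun valids middle => if pvIsValid (first :: (middle ++ [last])) then valids + 1 else valids) 0

-- ===== PORT B =====
-- sum(f[j] for j in range(i+1, n) if data[j] - data[i] <= 3), over (data[j], f[j]) pairs
def pvRow (x : Int) (pairs : List (Int × Int)) : Int :=
  pairs.foldl (fun s p => if p.1 - x ≤ 3 then s + p.2 else s) 0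

-- the array f built back to front: pvDp data = [f[0], …, f[n-1]]
def pvDp : List Int → List Int
  | [] => []
  | [_] => [1]                                   -- f[n-1] = 1
  | x :: y :: ys =>
      let rest := pvDp (y :: ys)
      pvRow x ((y :: ys).zip rest) :: rest

def count_valid_subsequences_alt (data : List Int) : Int :=
  if data.length < 3 then 1 else (pvDp data).headD 0   -- f[0]

-- ===== PRECONDITION & SPEC =====
def Spec_count_valid_subsequences (data : List Int) (out : Int) : Prop := out = count_valid_subsequences_alt data
instance (data : List Int) (out : Int) : Decidable (Spec_count_valid_subsequences data out) := by unfold Spec_count_valid_subsequences; infer_instance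

-- ===== CLAIM (what is proved, stated in full; the proofs are below) =====
def Claim_equal_count_valid_subsequences : Prop := ∀ (data : List Int), Dom_count_valid_subsequences data → Spec_count_valid_subsequences data (count_valid_subsequences data)

-- ===== LEMMAS AND PROOFS =====

-- the list of consecutive differences that A's reduce builds
def pvDiffsList (p : Int) : List Int → List Int
  | [] => []
  | y :: ys => (y - p) :: pvDiffsList y ys

-- 'all consecutive differences from prev on are ≤ 3', the validity A tests
def pvValidFrom (prev : Int) : List Int → Bool
  | [] => true
  | y :: ys => decide (y - prev ≤ 3) && pvValidFrom y ys

-- reference count: valid chains prev→(subset of l, in order)→last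
def pvCount (prev : Int) (l : List Int) (last : Int) : Nat :=
  match l with
  | [] => if last - prev ≤ 3 then 1 else 0
  | y :: ys => (if y - prev ≤ 3 then pvCount y ys last else 0) + pvCount prev ys last

lemma pvFoldl_diffReducer (l : List Int) : ∀ (acc : List Int) (p : Int),
    (l.foldl pvDiffReducer (acc, p)).1 = acc ++ pvDiffsList p l := by
  induction l with
  | nil => intro acc p; simp [pvDiffsList]
  | cons y ys ih =>
      intro acc p
      simp [pvDiffReducer, pvDiffsList, ih, List.append_assoc]

lemma pvGetDiffs_cons (p : Int) (l : List Int) :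
    pvGetDiffs (p :: l) = pvDiffsList p l := by
  simp [pvGetDiffs, pvFoldl_diffReducer, PySem.List.pyGetD, PySem.List.pyGet?, PySem.List.pyIdx?]

lemma pvIsValid_eq (prev : Int) (l : List Int) :
    pvIsValid (prev :: l) = pvValidFrom prev l := by
  rw [pvIsValid, pvGetDiffs_cons]
  induction l generalizing prev with
  | nil => simp [pvDiffsList, pvValidFrom]
  | cons y ys ih => simp [pvDiffsList, pvValidFrom, ih]

lemma pvCombos_large : ∀ (l : List Int) (k : Nat), l.length < k → pvCombos l k = [] := by
  intro l
  induction l with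
  | nil => intro k hk; cases k with | zero => simp at hk | succ k => rfl
  | cons x xs ih =>
      intro k hk
      cases k with
      | zero => simp at hk
      | succ k =>
          simp only [List.length_cons] at hk
          rw [pvCombos, ih k (by omega), ih (k + 1) (by omega)]
          simp

lemma pvSum_combos (last : Int) : ∀ (l : List Int) (prev : Int),
    ((List.range (l.length + 1)).map
      (fun i => List.countP (fun m => pvValidFrom prev (m ++ [last])) (pvCombos l i))).sum
    = pvCount prev l last := by
  intro l
  induction l with
  | nil =>
      intro prev
      simp [pvCombos, pvCount, pvValidFrom, List.countP_cons]
  | cons x xs ih =>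
      intro prev
      set p : List Int → Bool := fun m => pvValidFrom prev (m ++ [last]) with hp
      -- peel off i = 0, unfold the cons case of pvCombos
      simp only [List.length_cons]
      rw [List.range_succ_eq_map, List.map_cons, List.map_map, List.sum_cons]
      have hstep : ((List.range (xs.length + 1)).map
            ((fun i => List.countP p (pvCombos (x :: xs) i)) ∘ Nat.succ)).sum
          = ((List.range (xs.length + 1)).map
              (fun i => List.countP (p ∘ (fun m => x :: m)) (pvCombos xs i))).sum
            + ((List.range (xs.length + 1)).map
              (fun i => List.countP p (pvCombos xs (i + 1)))).sum := by
        rw [← List.sum_map_add]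
        apply congrArg
        apply List.map_congr_left
        intro i _
        simp [pvCombos, List.countP_append, List.countP_map]
      rw [hstep]
      -- the skip part: re-assemble the full sum over range (xs.length + 2)
      have hskip : List.countP p (pvCombos (x :: xs) 0)
            + ((List.range (xs.length + 1)).map (fun i => List.countP p (pvCombos xs (i + 1)))).sum
          = pvCount prev xs last := by
        have h0 : List.countP p (pvCombos (x :: xs) 0) = List.countP p (pvCombos xs 0) := by
          simp [pvCombos]
        have : ((List.range (xs.length + 1 + 1)).map (fun i => List.countP p (pvCombos xs i))).sum
            = List.countP p (pvCombos xs 0)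
              + ((List.range (xs.length + 1)).map (fun i => List.countP p (pvCombos xs (i + 1)))).sum := by
          rw [List.range_succ_eq_map, List.map_cons, List.map_map, List.sum_cons]
          rfl
        have htop : ((List.range (xs.length + 1 + 1)).map (fun i => List.countP p (pvCombos xs i))).sum
            = ((List.range (xs.length + 1)).map (fun i => List.countP p (pvCombos xs i))).sum := by
          rw [List.range_succ, List.map_append, List.sum_append]
          simp [pvCombos_large xs (xs.length + 1) (by omega)]
        rw [h0, ← this, htop, ih prev]
      -- the take part
      have htake : ((List.range (xs.length + 1)).map
            (fun i => List.countP (p ∘ (fun m => x :: m)) (pvCombos xs i))).sum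
          = if x - prev ≤ 3 then pvCount x xs last else 0 := by
        by_cases hx : x - prev ≤ 3
        · rw [if_pos hx, ← ih x]
          apply congrArg
          apply List.map_congr_left
          intro i _
          apply List.countP_congr
          intro m _
          simp [hp, pvValidFrom, hx]
        · rw [if_neg hx]
          have : ∀ i ∈ List.range (xs.length + 1),
              List.countP (p ∘ (fun m => x :: m)) (pvCombos xs i) = 0 := by
            intro i _
            rw [List.countP_eq_zero]
            intro m _
            simp [hp, pvValidFrom, hx]
          rw [List.map_congr_left this]
          simp
      rw [htake]
      simp only [pvCount]
      split <;> omega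

lemma pvA_eq (first last : Int) (middle : List Int)
    (h : ¬ (first :: (middle ++ [last])).length < 3) :
    count_valid_subsequences (first :: (middle ++ [last])) = (pvCount first middle last : Int) := by
  rw [count_valid_subsequences, if_neg h]
  have hfirst : PySem.List.pyGetD (first :: (middle ++ [last])) 0 0 = first := by
    have h0 : (0:Int) ≤ ↑middle.length + 1 := by positivity
    simp [PySem.List.pyGetD, PySem.List.pyGet?, PySem.List.pyIdx?, h0]
  have hlast : PySem.List.pyGetD (first :: (middle ++ [last])) (-1) 0 = last := by
    simp [PySem.List.pyGetD, PySem.List.pyGet?, PySem.List.pyIdx?]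
  have hslice : PySem.List.slice (first :: (middle ++ [last])) (some 1) (some (-1)) = middle := by
    have h2 : ¬((middle.length:Int) + 1 < 0) := by omega
    simp [PySem.List.slice, PySem.List.clampIdx, h2]
  simp only [hfirst, hlast, hslice, pvGetAllMiddleCombinations,
    PySem.List.foldl_append_eq_flatMap, List.nil_append,
    PySem.List.foldl_count_if, List.countP_flatMap, zero_add]
  rw [← pvSum_combos last middle first]
  refine congrArg (fun n : Nat => (n : Int)) (congrArg (fun l : List Nat => l.sum) (List.map_congr_left ?_))
  intro i _
  refine List.countP_congr ?_
  intro m _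
  rw [pvIsValid_eq]

lemma pvDp_cons (x : Int) (l : List Int) (h : l ≠ []) :
    pvDp (x :: l) = pvRow x (l.zip (pvDp l)) :: pvDp l := by
  cases l with
  | nil => exact absurd rfl h
  | cons y ys => rfl

lemma pvRow_foldl_init (x : Int) (L : List (Int × Int)) : ∀ (s : Int),
    L.foldl (fun s p => if p.1 - x ≤ 3 then s + p.2 else s) s = s + pvRow x L := by
  induction L with
  | nil => intro s; simp [pvRow]
  | cons q qs ih =>
      intro s
      rw [pvRow, List.foldl_cons, List.foldl_cons, ih, ih (if q.1 - x ≤ 3 then 0 + q.2 else 0)]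
      split <;> ring

lemma pvRow_eq_count : ∀ (middle : List Int) (x last : Int),
    pvRow x ((middle ++ [last]).zip (pvDp (middle ++ [last]))) = (pvCount x middle last : Int) := by
  intro middle
  induction middle with
  | nil =>
      intro x last
      simp only [List.nil_append]
      show pvRow x ([last].zip [1]) = _
      simp [pvRow, pvCount]
  | cons y ys ih =>
      intro x last
      rw [List.cons_append, pvDp_cons y (ys ++ [last]) (by simp), List.zip_cons_cons,
          pvRow, List.foldl_cons, pvRow_foldl_init]
      show (if y - x ≤ 3 then 0 + pvRow y ((ys ++ [last]).zip (pvDp (ys ++ [last]))) else 0)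
          + pvRow x ((ys ++ [last]).zip (pvDp (ys ++ [last]))) = _
      rw [ih y last, ih x last, pvCount]
      push_cast
      split <;> ring

lemma pvB_eq (first last : Int) (middle : List Int)
    (h : ¬ (first :: (middle ++ [last])).length < 3) :
    count_valid_subsequences_alt (first :: (middle ++ [last])) = (pvCount first middle last : Int) := by
  rw [count_valid_subsequences_alt, if_neg h, pvDp_cons first (middle ++ [last]) (by simp),
      List.headD_cons, pvRow_eq_count]

-- ===== VERDICT (by name: the statement is the Claim_ definition above) =====
theorem count_valid_subsequences_spec : Claim_equal_count_valid_subsequences := by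
  intro data _hdom
  unfold Spec_count_valid_subsequences
  by_cases h : data.length < 3
  · rw [count_valid_subsequences, count_valid_subsequences_alt, if_pos h, if_pos h]
  · cases data with
    | nil => simp at h
    | cons first rest =>
        have hr : rest ≠ [] := by intro he; subst he; simp at h
        have hdec : rest = rest.dropLast ++ [rest.getLast hr] := (List.dropLast_append_getLast hr).symm
        rw [hdec] at h ⊢
        rw [pvA_eq _ _ _ h, pvB_eq _ _ _ h]
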